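-- pv_equiv track=rewrite | github.com/cailleanC1C/C1C-Recruitment | shared/logfmt.py | _ordered_scheduler_buckets
-- ===== SOURCE A (Python) =====
-- from typing import Mapping, Optional, Sequence
--
-- _DEFAULT_SCHEDULER_BUCKETS: tuple[str, ...] = (
--     "clans",
--     "templates",
--     "clan_tags",
--     "onboarding_questions",
-- )
--
-- def _ordered_scheduler_buckets(
--     intervals: Mapping[str, str], upcoming: Mapping[str, str]
-- ) -> list[str]:
--     order: list[str] = []
--     seen: set[str] = set()
--     for key in _DEFAULT_SCHEDULER_BUCKETS:
--         if key in intervals or key in upcoming: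
--             order.append(key)
--             seen.add(key)
--     for mapping in (intervals, upcoming):
--         for key in mapping:
--             if key not in seen:
--                 order.append(key)
--                 seen.add(key)
--     if not order:
--         order = list(_DEFAULT_SCHEDULER_BUCKETS)
--     return order
-- ===== SOURCE B (Python) =====
-- from typing import Mapping
--
-- _DEFAULT_SCHEDULER_BUCKETS: tuple[str, ...] = (
--     "clans",
--     "templates",
--     "clan_tags",
--     "onboarding_questions",
-- )
--
-- def _ordered_scheduler_buckets(
--     intervals: Mapping[str, str], upcoming: Mapping[str, str]
-- ) -> list[str]:
--     keys = list(dict.fromkeys([*intervals, *upcoming]))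
--     if not keys:
--         return list(_DEFAULT_SCHEDULER_BUCKETS)
--     n = len(_DEFAULT_SCHEDULER_BUCKETS)
--     buckets: list[list[str]] = [[] for _ in range(n + 1)]
--     for key in keys:
--         j = _DEFAULT_SCHEDULER_BUCKETS.index(key) if key in _DEFAULT_SCHEDULER_BUCKETS else n
--         buckets[j].append(key)
--     return [key for bucket in buckets for key in bucket]
-- ===== Notes on version B (the rewrite author's own statement) =====
-- stated objective: alternative
-- what changed: Replaces A's two staged append-with-seen-set loops by a bucket (counting) distribution: dedup the union of both key lists once, drop each key into a rank bucket (its index among the defaults, or a final overflow bucket), and flatten the buckets; the seen set and the membership tests of defaults against the mappings disappear.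
import Mathlib
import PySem

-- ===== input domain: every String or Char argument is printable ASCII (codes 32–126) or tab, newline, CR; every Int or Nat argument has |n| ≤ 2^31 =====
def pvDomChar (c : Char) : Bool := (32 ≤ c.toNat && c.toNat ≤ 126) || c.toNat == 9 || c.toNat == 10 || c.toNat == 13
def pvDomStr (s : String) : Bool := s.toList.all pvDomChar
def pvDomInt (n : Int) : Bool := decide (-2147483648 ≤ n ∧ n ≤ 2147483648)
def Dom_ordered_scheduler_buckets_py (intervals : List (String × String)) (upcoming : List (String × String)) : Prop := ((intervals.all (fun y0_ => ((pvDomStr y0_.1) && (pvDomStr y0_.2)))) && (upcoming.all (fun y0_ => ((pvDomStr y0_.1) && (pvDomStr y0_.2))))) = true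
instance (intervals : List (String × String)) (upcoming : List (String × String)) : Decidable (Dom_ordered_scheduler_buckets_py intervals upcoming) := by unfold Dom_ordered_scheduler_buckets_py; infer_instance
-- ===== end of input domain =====

-- B replaces A's two seen-set append loops by a bucket distribution: dedup the union of the key
-- lists once, drop each key into its rank bucket, flatten; objective: alternative algorithm, same cost.

def defaultBuckets : List String := ["clans", "templates", "clan_tags", "onboarding_questions"]

-- ===== PORT A =====
-- loop 1: for key in _DEFAULT_SCHEDULER_BUCKETS: if key in intervals or key in upcoming: append + add
def aStep1 (ikeys ukeys : List String) (st : List String × PySem.Set String) (key : String) :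
    List String × PySem.Set String :=
  if ikeys.contains key || ukeys.contains key then
    (st.1 ++ [key], PySem.Set.add st.2 key)
  else st

-- loop 2 body: for key in mapping: if key not in seen: append + add
def aStep2 (st : List String × PySem.Set String) (key : String) :
    List String × PySem.Set String :=
  if PySem.Set.contains st.2 key then st
  else (st.1 ++ [key], PySem.Set.add st.2 key)

def ordered_scheduler_buckets_py (intervals : List (String × String)) (upcoming : List (String × String)) : List String :=
  let ikeys := intervals.map Prod.fst
  let ukeys := upcoming.map Prod.fst
  let st1 := defaultBuckets.foldl (aStep1 ikeys ukeys) ([], PySem.Set.empty)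
  let st2 := ikeys.foldl aStep2 st1
  let st3 := ukeys.foldl aStep2 st2
  if st3.1 = [] then defaultBuckets else st3.1

-- ===== PORT B =====
-- j = _DEFAULT_SCHEDULER_BUCKETS.index(key) if key in _DEFAULT_SCHEDULER_BUCKETS else n
-- (index? is some exactly when the membership guard holds, so the match is exact); buckets[j].append(key)
def bStep (bs : List (List String)) (key : String) : List (List String) :=
  let j : Nat := match PySem.List.index? defaultBuckets key with
    | some j => j
    | none => 4
  bs.set j (bs.getD j [] ++ [key])

def ordered_scheduler_buckets_py_alt (intervals : List (String × String)) (upcoming : List (String × String)) : List String :=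
  let keys := PySem.List.dedup (intervals.map Prod.fst ++ upcoming.map Prod.fst)
  if keys = [] then defaultBuckets
  else
    let buckets := keys.foldl bStep (List.replicate 5 ([] : List String))
    buckets.flatten

-- ===== PRECONDITION & SPEC =====
def Spec_ordered_scheduler_buckets_py (intervals : List (String × String)) (upcoming : List (String × String)) (out : List String) : Prop := out = ordered_scheduler_buckets_py_alt intervals upcoming
instance (intervals : List (String × String)) (upcoming : List (String × String)) (out : List String) : Decidable (Spec_ordered_scheduler_buckets_py intervals upcoming out) := by unfold Spec_ordered_scheduler_buckets_py; infer_instance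

-- ===== CLAIM (what is proved, stated in full; the proofs are below) =====
def Claim_equal_ordered_scheduler_buckets_py : Prop := ∀ (intervals : List (String × String)) (upcoming : List (String × String)), Dom_ordered_scheduler_buckets_py intervals upcoming → Spec_ordered_scheduler_buckets_py intervals upcoming (ordered_scheduler_buckets_py intervals upcoming)

-- ===== LEMMAS AND PROOFS =====

theorem set_add_of_not_mem (l : List String) (k : String) (h : k ∉ l) :
    PySem.Set.add l k = l ++ [k] := by
  simp [PySem.Set.add, PySem.Set.contains, h]

-- phase 1 of A: the filtered defaults, seen = order (nodup inputs fresh w.r.t. l)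
theorem phase1 (ikeys ukeys : List String) :
    ∀ (ks l : List String), (∀ k ∈ ks, k ∉ l) → ks.Nodup →
      ks.foldl (aStep1 ikeys ukeys) (l, l)
        = (l ++ ks.filter (fun k => ikeys.contains k || ukeys.contains k),
           l ++ ks.filter (fun k => ikeys.contains k || ukeys.contains k)) := by
  intro ks
  induction ks with
  | nil => intro l _ _; simp
  | cons k ks ih =>
    intro l hfresh hnd
    have hk : k ∉ l := hfresh k (by simp)
    by_cases hc : (ikeys.contains k || ukeys.contains k) = true
    · have : aStep1 ikeys ukeys (l, l) k = (l ++ [k], l ++ [k]) := by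
        simp only [aStep1, hc, if_true, set_add_of_not_mem l k hk]
      rw [List.foldl_cons, this,
        ih (l ++ [k])
          (by
            intro x hx
            have hxl := hfresh x (by simp [hx])
            have hxk : x ≠ k := by
              intro he; subst he; exact (List.nodup_cons.mp hnd).1 hx
            simp [hxl, hxk])
          (List.nodup_cons.mp hnd).2]
      have hc' : k ∈ ikeys ∨ k ∈ ukeys := by simpa using hc
      simp [List.filter_cons]
      tauto
    · have hcn : k ∉ ikeys ∧ k ∉ ukeys := by simpa using hc
      have : aStep1 ikeys ukeys (l, l) k = (l, l) := by simp [aStep1, hcn.1, hcn.2]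
      rw [List.foldl_cons, this,
        ih l (fun x hx => hfresh x (by simp [hx])) (List.nodup_cons.mp hnd).2]
      simp [List.filter_cons]
      tauto

-- phase 2 of A: equal components stay equal and become Set.update
theorem phase2 : ∀ (ks l : List String),
    ks.foldl aStep2 (l, l) = (PySem.Set.update l ks, PySem.Set.update l ks) := by
  intro ks
  induction ks with
  | nil => intro l; simp [PySem.Set.update]
  | cons k ks ih =>
    intro l
    have hstep : aStep2 (l, l) k = (PySem.Set.add l k, PySem.Set.add l k) := by
      by_cases h : k ∈ l
      · simp [aStep2, PySem.Set.contains, h]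
      · simp [aStep2, PySem.Set.contains, h]
    rw [List.foldl_cons, hstep, ih]
    simp [PySem.Set.update]

-- extending a nodup seed with Set.add: the new tail is the deduped list minus the seed
theorem update_nodup : ∀ (xs s : List String), s.Nodup →
    xs.foldl PySem.Set.add s
      = s ++ (xs.foldl PySem.Set.add []).filter (fun k => decide (k ∉ s)) := by
  intro xs
  induction xs with
  | nil => intro s _; simp
  | cons x xs ih =>
    intro s hs
    have hx : (x :: xs).foldl PySem.Set.add []
        = x :: (xs.foldl PySem.Set.add []).filter (fun k => decide (k ∉ ([x] : List String))) := by
      rw [List.foldl_cons, show PySem.Set.add [] x = [x] from rfl, ih [x] (by simp)]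
      simp
    rw [List.foldl_cons, hx]
    by_cases h : x ∈ s
    · have hadd : PySem.Set.add s x = s := by simp [PySem.Set.add, PySem.Set.contains, h]
      rw [hadd, ih s hs, List.filter_cons]
      have hxf : decide (x ∉ s) = false := by simp [h]
      rw [hxf]
      simp only [Bool.false_eq_true, if_false, List.filter_filter]
      congr 1
      apply List.filter_congr
      intro k _
      by_cases hkx : k = x
      · subst hkx; simp [h]
      · simp [hkx]
    · have hadd : PySem.Set.add s x = s ++ [x] := set_add_of_not_mem s x h
      have hsx : (s ++ [x]).Nodup := by
        simp [List.nodup_append, hs]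
        intro a ha hax
        exact h (hax ▸ ha)
      rw [hadd, ih (s ++ [x]) hsx, List.filter_cons]
      have hxh : decide (x ∉ s) = true := by simp [h]
      rw [hxh]
      simp only [if_true, List.filter_filter, List.append_assoc, List.singleton_append]
      congr 2
      apply List.filter_congr
      intro k _
      by_cases hkx : k = x
      · subst hkx; simp [h]
      · simp [hkx, List.mem_append]
-- one bucket step, written out for a concrete 5-list of buckets
theorem bStep_eq (b0 b1 b2 b3 b4 : List String) (k : String) :
    bStep [b0, b1, b2, b3, b4] k =
      if k = "clans" then [b0 ++ [k], b1, b2, b3, b4]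
      else if k = "templates" then [b0, b1 ++ [k], b2, b3, b4]
      else if k = "clan_tags" then [b0, b1, b2 ++ [k], b3, b4]
      else if k = "onboarding_questions" then [b0, b1, b2, b3 ++ [k], b4]
      else [b0, b1, b2, b3, b4 ++ [k]] := by
  by_cases h0 : k = "clans"
  · subst h0; rfl
  by_cases h1 : k = "templates"
  · subst h1; rw [if_neg h0]; rfl
  by_cases h2 : k = "clan_tags"
  · subst h2; rw [if_neg h0, if_neg h1]; rfl
  by_cases h3 : k = "onboarding_questions"
  · subst h3; rw [if_neg h0, if_neg h1, if_neg h2]; rfl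
  · have hnm : k ∉ defaultBuckets := by simp [defaultBuckets, h0, h1, h2, h3]
    have hidx : PySem.List.index? defaultBuckets k = none := by
      rw [PySem.List.index?_eq_none_iff]; exact hnm
    rw [if_neg h0, if_neg h1, if_neg h2, if_neg h3]
    simp only [bStep]
    rw [hidx]
    rfl

-- B's bucket fold, characterised bucket by bucket
theorem bFold : ∀ (l : List String),
    l.foldl bStep (List.replicate 5 ([] : List String))
      = [l.filter (· == "clans"), l.filter (· == "templates"), l.filter (· == "clan_tags"),
         l.filter (· == "onboarding_questions"), l.filter (fun k => decide (k ∉ defaultBuckets))] := by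
  intro l
  induction l using List.reverseRecOn with
  | nil => rfl
  | append_singleton l k ih =>
    rw [List.foldl_append, List.foldl_cons, List.foldl_nil, ih, bStep_eq]
    by_cases h0 : k = "clans"
    · subst h0; simp [List.filter_append, defaultBuckets]
    by_cases h1 : k = "templates"
    · subst h1; simp [List.filter_append, defaultBuckets, h0]
    by_cases h2 : k = "clan_tags"
    · subst h2; simp [List.filter_append, defaultBuckets, h0, h1]
    by_cases h3 : k = "onboarding_questions"
    · subst h3; simp [List.filter_append, defaultBuckets, h0, h1, h2]
    · have hnm : k ∉ defaultBuckets := by simp [defaultBuckets, h0, h1, h2, h3]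
      simp [List.filter_append, h0, h1, h2, h3, defaultBuckets]

-- on a nodup list, filtering for one value yields that value once or not at all
theorem filter_beq_nodup : ∀ (l : List String), l.Nodup → ∀ (c : String),
    l.filter (· == c) = if c ∈ l then [c] else [] := by
  intro l
  induction l with
  | nil => intro _ c; simp
  | cons x l ih =>
    intro hl c
    rw [List.filter_cons]
    by_cases hx : x = c
    · subst hx
      have hcl : x ∉ l := (List.nodup_cons.mp hl).1
      have hfl : l.filter (· == x) = [] := by
        rw [List.filter_eq_nil_iff]
        intro a ha he
        simp at he
        subst he
        exact hcl ha
      simp [hfl]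
    · rw [ih (List.nodup_cons.mp hl).2 c]
      simp [hx, Ne.symm hx]

-- ===== VERDICT (by name: the statement is the Claim_ definition above) =====
theorem ordered_scheduler_buckets_py_spec : Claim_equal_ordered_scheduler_buckets_py := by
  intro intervals upcoming _
  unfold Spec_ordered_scheduler_buckets_py ordered_scheduler_buckets_py ordered_scheduler_buckets_py_alt
  have hnd : defaultBuckets.Nodup := by decide
  dsimp only
  simp only [PySem.Set.empty]
  rw [phase1 _ _ defaultBuckets [] (by simp) hnd]
  simp only [List.nil_append]
  rw [phase2, phase2]
  set i := intervals.map Prod.fst with hi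
  set u := upcoming.map Prod.fst with hu
  set f := defaultBuckets.filter (fun k => i.contains k || u.contains k) with hf
  set d := (i ++ u).foldl PySem.Set.add [] with hd
  have hdd : PySem.List.dedup (i ++ u) = d := by
    rw [PySem.List.dedup_eq_ofList, PySem.Set.ofList_eq_foldl]
  have hfnd : f.Nodup := hnd.filter _
  have hdnd : d.Nodup := by
    rw [← hdd]; exact PySem.List.nodup_dedup _
  have hmemd : ∀ k, k ∈ d ↔ k ∈ i ∨ k ∈ u := by
    intro k; rw [← hdd, PySem.List.mem_dedup]; simp
  -- A's core list
  have hcore : PySem.Set.update (PySem.Set.update f i) u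
      = f ++ d.filter (fun k => decide (k ∉ f)) := by
    simp only [PySem.Set.update]
    rw [← List.foldl_append, update_nodup (i ++ u) f hfnd, ← hd]
  -- f written against d
  have hf' : f = defaultBuckets.filter (fun k => decide (k ∈ d)) := by
    rw [hf]
    apply List.filter_congr
    intro k _
    simp [hmemd k]
  -- the tail filter written against defaultBuckets
  have htail : d.filter (fun k => decide (k ∉ f))
      = d.filter (fun k => decide (k ∉ defaultBuckets)) := by
    apply List.filter_congr
    intro k hk
    have : k ∈ f ↔ k ∈ defaultBuckets := by
      rw [hf']
      simp [List.mem_filter, hk]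
    simp [this]
  rw [hcore, htail, hdd, hf']
  by_cases hde : d = []
  · simp [hde]
  · have hne : defaultBuckets.filter (fun k => decide (k ∈ d))
        ++ d.filter (fun k => decide (k ∉ defaultBuckets)) ≠ [] := by
      intro hemp
      rcases List.exists_mem_of_ne_nil d hde with ⟨k, hk⟩
      rcases List.append_eq_nil_iff.mp hemp with ⟨h1, h2⟩
      by_cases hkd : k ∈ defaultBuckets
      · have : k ∈ defaultBuckets.filter (fun k => decide (k ∈ d)) := by
          simp [List.mem_filter, hkd, hk]
        rw [h1] at this; simp at this
      · have : k ∈ d.filter (fun k => decide (k ∉ defaultBuckets)) := by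
          simp [List.mem_filter, hkd, hk]
        rw [h2] at this; simp at this
    rw [if_neg hne, if_neg hde, bFold]
    dsimp only
    -- flatten the five buckets and normalise both sides
    rw [filter_beq_nodup d hdnd "clans", filter_beq_nodup d hdnd "templates",
        filter_beq_nodup d hdnd "clan_tags", filter_beq_nodup d hdnd "onboarding_questions"]
    simp only [List.flatten_cons, List.flatten_nil, List.append_nil]
    simp only [defaultBuckets, List.filter_cons, List.filter_nil]
    by_cases m0 : "clans" ∈ d <;> by_cases m1 : "templates" ∈ d <;>
      by_cases m2 : "clan_tags" ∈ d <;> by_cases m3 : "onboarding_questions" ∈ d <;>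
      simp [m0, m1, m2, m3]
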